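-- pv_equiv track=rewrite | github.com/yidao620c/core-algorithm | algorithms/ch07dynamic/at403_elevator.py | elevatorSchedule
-- ===== SOURCE A (Python) =====
-- def elevatorSchedule(seq):
--     """
--     seq: 去往每层的人数， 下标代表楼层号， 很明显0和1层都是0
--     """
--     N1 = N2 = 0  # 到当前层以下的有N1人， 到当前层的有N1人
--     N3 = 0  # 到当前层以上的有N3人
--     nMinFloors = 0  # 所有乘客要爬的楼层最小总和
--     nTargetFloor = 1  # 达到最小值时候的楼层
--     for i in range(2, len(seq)):
--         N3 += seq[i]
--         nMinFloors += seq[i] * (i - 1)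
--     for i in range(2, len(seq)):
--         if N1 + N2 < N3:
--             nTargetFloor = i
--             nMinFloors += (N1 + N2 - N3)
--             N1 += N2
--             N2 = seq[i]
--             N3 -= seq[i]
--         else:
--             break
--     return nTargetFloor, nMinFloors
-- ===== SOURCE B (Python) =====
-- def elevatorSchedule(seq):
--     # Prefix-sum scan to find the stop floor (first floor where at-or-below >= above),
--     # then the total climbed floors by one closed-form weighted-distance sum.
--     n = len(seq)
--     total = sum(seq[2:])
--     t = 1
--     pre = 0
--     for i in range(2, n):
--         if 2 * pre >= total:
--             break
--         t = i
--         pre += seq[i]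
--     return t, sum(seq[i] * abs(i - t) for i in range(2, n))
-- ===== Notes on version B (the rewrite author's own statement) =====
-- stated objective: simpler
-- what changed: Replaces A's sweep that maintains four counters (N1,N2,N3) with an incremental cost update by a single prefix-sum scan with the closed test 2*pre >= total to find the stop floor, then computes the cost directly as one weighted-distance sum.
import Mathlib
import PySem

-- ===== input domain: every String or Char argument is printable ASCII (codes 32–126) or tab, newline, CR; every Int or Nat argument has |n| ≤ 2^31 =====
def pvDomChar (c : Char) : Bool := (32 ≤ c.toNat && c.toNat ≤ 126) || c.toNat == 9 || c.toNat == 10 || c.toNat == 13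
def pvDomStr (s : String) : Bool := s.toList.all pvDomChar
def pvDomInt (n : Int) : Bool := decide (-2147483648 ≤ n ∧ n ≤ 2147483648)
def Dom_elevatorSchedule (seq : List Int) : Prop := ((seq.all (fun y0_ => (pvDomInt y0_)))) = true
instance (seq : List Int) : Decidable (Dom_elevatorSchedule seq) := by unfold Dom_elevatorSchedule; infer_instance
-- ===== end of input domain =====

-- B replaces A's four-counter sweep with incremental cost update by a prefix-sum scan
-- plus one direct weighted-distance sum (objective: simpler; same value on every input).

-- ===== PORT A =====
-- loop body of A's second loop; state (N1, N2, N3, nTargetFloor, nMinFloors, broken)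
-- seq[i] is ported as pyGetD (exact: every accessed index i satisfies 2 ≤ i < len seq)
def stepA (seq : List Int) : Int × Int × Int × Int × Int × Bool → Int → Int × Int × Int × Int × Int × Bool :=
  fun st i =>
    match st with
    | (n1, n2, n3, tf, mf, br) =>
      if br then (n1, n2, n3, tf, mf, br)
      else if n1 + n2 < n3 then
        (n1 + n2, PySem.List.pyGetD seq i 0, n3 - PySem.List.pyGetD seq i 0, i,
         mf + (n1 + n2 - n3), false)
      else (n1, n2, n3, tf, mf, true)

def elevatorSchedule (seq : List Int) : Int × Int :=
  let n : Int := seq.length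
  -- first loop: N3 += seq[i]; nMinFloors += seq[i] * (i - 1)
  let p := (PySem.List.pyRange 2 n 1).foldl
    (fun (st : Int × Int) i =>
      (st.1 + PySem.List.pyGetD seq i 0, st.2 + PySem.List.pyGetD seq i 0 * (i - 1)))
    (0, 0)
  -- second loop ('break' ported as a frozen flag)
  let st := (PySem.List.pyRange 2 n 1).foldl (stepA seq) (0, 0, p.1, 1, p.2, false)
  (st.2.2.2.1, st.2.2.2.2.1)

-- ===== PORT B =====
-- loop body of B's scan; state (t, pre, done); 'break' ported as a frozen flag
def stepB (seq : List Int) (total : Int) : Int × Int × Bool → Int → Int × Int × Bool :=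
  fun st i =>
    match st with
    | (t, pre, done) =>
      if done then (t, pre, done)
      else if 2 * pre ≥ total then (t, pre, true)
      else (i, pre + PySem.List.pyGetD seq i 0, false)

def elevatorSchedule_alt (seq : List Int) : Int × Int :=
  let n : Int := seq.length
  let total := (PySem.List.slice seq (some 2) none).sum
  let st := (PySem.List.pyRange 2 n 1).foldl (stepB seq total) (1, 0, false)
  (st.1, (PySem.List.pyRange 2 n 1).foldl
    (fun acc i => acc + PySem.List.pyGetD seq i 0 * |i - st.1|) 0)

-- ===== PRECONDITION & SPEC =====
def Spec_elevatorSchedule (seq : List Int) (out : Int × Int) : Prop := out = elevatorSchedule_alt seq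
instance (seq : List Int) (out : Int × Int) : Decidable (Spec_elevatorSchedule seq out) := by unfold Spec_elevatorSchedule; infer_instance

-- ===== CLAIM (what is proved, stated in full; the proofs are below) =====
def Claim_equal_elevatorSchedule : Prop := ∀ (seq : List Int), Dom_elevatorSchedule seq → Spec_elevatorSchedule seq (elevatorSchedule seq)

-- ===== LEMMAS AND PROOFS =====

-- sum of seq[j] for j in pyRange a b
def pvS (seq : List Int) (a b : Int) : Int :=
  ((PySem.List.pyRange a b 1).map (fun j => PySem.List.pyGetD seq j 0)).sum

-- total climbed floors when the elevator stops at floor t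
def pvC (seq : List Int) (n t : Int) : Int :=
  ((PySem.List.pyRange 2 n 1).map (fun j => PySem.List.pyGetD seq j 0 * |j - t|)).sum

lemma pyRange_split (a c b : Int) (hac : a ≤ c) (hcb : c ≤ b) :
    PySem.List.pyRange a b 1 = PySem.List.pyRange a c 1 ++ PySem.List.pyRange c b 1 := by
  have h : ∀ k : Nat, ∀ b : Int, c ≤ b → (b - c).toNat = k →
      PySem.List.pyRange a b 1 = PySem.List.pyRange a c 1 ++ PySem.List.pyRange c b 1 := by
    intro k
    induction k with
    | zero =>
      intro b hb hk
      have hbc : b = c := by omega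
      subst hbc
      simp [PySem.List.pyRange_one_eq_nil (le_refl b)]
    | succ k ih =>
      intro b hb hk
      have hb1 : c ≤ b - 1 := by omega
      have hb2 : b = (b - 1) + 1 := by omega
      rw [hb2, PySem.List.pyRange_one_succ_right (by omega),
          PySem.List.pyRange_one_succ_right hb1, ih (b - 1) hb1 (by omega), List.append_assoc]
  exact h (b - c).toNat b hcb rfl

lemma pvS_succ (seq : List Int) (a i : Int) (h : a ≤ i) :
    pvS seq a (i + 1) = pvS seq a i + PySem.List.pyGetD seq i 0 := by
  unfold pvS
  rw [PySem.List.pyRange_one_succ_right h]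
  simp

lemma pvS_refl (seq : List Int) (a : Int) : pvS seq a a = 0 := by
  unfold pvS
  rw [PySem.List.pyRange_one_eq_nil (le_refl a)]
  simp

lemma sum_map_add_fn (f g : Int → Int) (l : List Int) :
    (l.map (fun j => f j + g j)).sum = (l.map f).sum + (l.map g).sum := by
  induction l with
  | nil => simp
  | cons x xs ih => simp [ih]; ring

lemma sum_map_sub_fn (f g : Int → Int) (l : List Int) :
    (l.map (fun j => f j - g j)).sum = (l.map f).sum - (l.map g).sum := by
  induction l with
  | nil => simp
  | cons x xs ih => simp [ih]; ring

lemma pvC_shift (seq : List Int) (n i : Int) (h2 : 2 ≤ i) (hn : i ≤ n) :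
    pvC seq n i = pvC seq n (i - 1) + (2 * pvS seq 2 i - pvS seq 2 n) := by
  unfold pvC pvS
  rw [pyRange_split 2 i n h2 hn]
  simp only [List.map_append, List.sum_append]
  have hl : ((PySem.List.pyRange 2 i 1).map (fun j => PySem.List.pyGetD seq j 0 * |j - i|)).sum
      = ((PySem.List.pyRange 2 i 1).map
          (fun j => PySem.List.pyGetD seq j 0 * |j - (i - 1)| + PySem.List.pyGetD seq j 0)).sum := by
    congr 1
    apply List.map_congr_left
    intro j hj
    have hm := (PySem.List.mem_pyRange_one).1 hj
    rw [abs_of_nonpos (by omega), abs_of_nonpos (by omega)]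
    ring
  have hr : ((PySem.List.pyRange i n 1).map (fun j => PySem.List.pyGetD seq j 0 * |j - i|)).sum
      = ((PySem.List.pyRange i n 1).map
          (fun j => PySem.List.pyGetD seq j 0 * |j - (i - 1)| - PySem.List.pyGetD seq j 0)).sum := by
    congr 1
    apply List.map_congr_left
    intro j hj
    have hm := (PySem.List.mem_pyRange_one).1 hj
    rw [abs_of_nonneg (by omega), abs_of_nonneg (by omega)]
    ring
  rw [hl, hr, sum_map_add_fn, sum_map_sub_fn]
  ring

lemma pvC_one (seq : List Int) (n : Int) :
    pvC seq n 1 = ((PySem.List.pyRange 2 n 1).map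
      (fun j => PySem.List.pyGetD seq j 0 * (j - 1))).sum := by
  unfold pvC
  congr 1
  apply List.map_congr_left
  intro j hj
  have hm := (PySem.List.mem_pyRange_one).1 hj
  rw [abs_of_nonneg (by omega)]

lemma stepA_frozen (seq : List Int) (l : List Int) (n1 n2 n3 tf mf : Int) :
    l.foldl (stepA seq) (n1, n2, n3, tf, mf, true) = (n1, n2, n3, tf, mf, true) := by
  induction l <;> simp_all [stepA]

lemma stepB_frozen (seq : List Int) (total : Int) (l : List Int) (t pre : Int) :
    l.foldl (stepB seq total) (t, pre, true) = (t, pre, true) := by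
  induction l <;> simp_all [stepB]

lemma foldl_add_map (f : Int → Int) (l : List Int) (a : Int) :
    l.foldl (fun acc i => acc + f i) a = a + (l.map f).sum := by
  induction l generalizing a with
  | nil => simp
  | cons x xs ih => simp [ih]; ring

lemma foldl_pair_add (f g : Int → Int) (l : List Int) (a b : Int) :
    l.foldl (fun (st : Int × Int) i => (st.1 + f i, st.2 + g i)) (a, b)
      = (a + (l.map f).sum, b + (l.map g).sum) := by
  induction l generalizing a b with
  | nil => simp
  | cons x xs ih => simp [ih]; constructor <;> ring

lemma drop_sum_pvS (seq : List Int) : ∀ (k a : Nat), seq.length - a = k →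
    (seq.drop a).sum = pvS seq (a : Int) (seq.length : Int) := by
  intro k
  induction k with
  | zero =>
    intro a h
    have hle : seq.length ≤ a := by omega
    unfold pvS
    rw [List.drop_eq_nil_of_le hle, PySem.List.pyRange_one_eq_nil (by exact_mod_cast hle)]
    simp
  | succ k ih =>
    intro a h
    have ha : a < seq.length := by omega
    have hcast : ((a : Int)) < (seq.length : Int) := by exact_mod_cast ha
    unfold pvS
    rw [PySem.List.pyRange_one_cons hcast, List.drop_eq_getElem_cons ha]
    simp only [List.map_cons, List.sum_cons]
    have h1 : PySem.List.pyGetD seq (a : Int) 0 = seq[a] := by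
      simp [List.getD_eq_getElem?_getD, List.getElem?_eq_getElem ha]
    have h2 : ((a : Int) + 1) = (((a + 1 : Nat)) : Int) := by push_cast; ring
    have h3 := ih (a + 1) (by omega)
    unfold pvS at h3
    rw [h1, h2, ← h3]

lemma slice_sum (seq : List Int) :
    (PySem.List.slice seq (some 2) none).sum = pvS seq 2 (seq.length : Int) := by
  have hsl : PySem.List.slice seq (some 2) none = seq.drop 2 := by
    norm_num [PySem.List.slice_from]
    rfl
  rw [hsl]
  have := drop_sum_pvS seq (seq.length - 2) 2 rfl
  simpa using this

-- main loop relation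
lemma loop_rel (seq : List Int) (n : Int) (k : Nat) : ∀ (i : Int), 2 ≤ i → i ≤ n →
    (n - i).toNat = k →
    ∀ n1 n2 : Int, n1 + n2 = pvS seq 2 i →
    (((PySem.List.pyRange i n 1).foldl (stepA seq)
        (n1, n2, pvS seq 2 n - pvS seq 2 i, i - 1, pvC seq n (i - 1), false)).2.2.2.1
      = ((PySem.List.pyRange i n 1).foldl (stepB seq (pvS seq 2 n))
        (i - 1, pvS seq 2 i, false)).1)
    ∧ (((PySem.List.pyRange i n 1).foldl (stepA seq)
        (n1, n2, pvS seq 2 n - pvS seq 2 i, i - 1, pvC seq n (i - 1), false)).2.2.2.2.1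
      = pvC seq n (((PySem.List.pyRange i n 1).foldl (stepB seq (pvS seq 2 n))
        (i - 1, pvS seq 2 i, false)).1)) := by
  induction k with
  | zero =>
    intro i h2 hn hk n1 n2 hpre
    have hin : n ≤ i := by omega
    rw [PySem.List.pyRange_one_eq_nil hin]
    exact ⟨rfl, rfl⟩
  | succ k ih =>
    intro i h2 hn hk n1 n2 hpre
    have hlt : i < n := by omega
    rw [PySem.List.pyRange_one_cons hlt]
    simp only [List.foldl_cons]
    by_cases hc : 2 * pvS seq 2 i < pvS seq 2 n
    · -- beneficial move: both loops advance
      have hcond : n1 + n2 < pvS seq 2 n - pvS seq 2 i := by linarith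
      have hv : pvS seq 2 (i + 1) = pvS seq 2 i + PySem.List.pyGetD seq i 0 :=
        pvS_succ seq 2 i (by omega)
      have e3 : pvS seq 2 n - pvS seq 2 i - PySem.List.pyGetD seq i 0
          = pvS seq 2 n - pvS seq 2 (i + 1) := by rw [hv]; ring
      have e5 : pvC seq n (i - 1) + (n1 + n2 - (pvS seq 2 n - pvS seq 2 i))
          = pvC seq n (i + 1 - 1) := by
        have h1 : i + 1 - 1 = i := by ring
        rw [h1, pvC_shift seq n i h2 (by omega)]
        linarith
      have hstA : stepA seq (n1, n2, pvS seq 2 n - pvS seq 2 i, i - 1, pvC seq n (i - 1), false) i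
          = (n1 + n2, PySem.List.pyGetD seq i 0, pvS seq 2 n - pvS seq 2 (i + 1),
             i + 1 - 1, pvC seq n (i + 1 - 1), false) := by
        simp only [stepA]
        rw [if_neg (by simp), if_pos hcond, ← e3, ← e5]
        have h1 : i + 1 - 1 = i := by ring
        rw [h1]
      have hstB : stepB seq (pvS seq 2 n) (i - 1, pvS seq 2 i, false) i
          = (i + 1 - 1, pvS seq 2 (i + 1), false) := by
        simp only [stepB]
        rw [if_neg (by simp), if_neg (by omega), hv]
        norm_num
      rw [hstA, hstB]
      exact ih (i + 1) (by omega) (by omega) (by omega) (n1 + n2) (PySem.List.pyGetD seq i 0)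
        (by rw [hv, hpre])
    · -- no improvement: both loops break and freeze
      have hcond : ¬ (n1 + n2 < pvS seq 2 n - pvS seq 2 i) := by omega
      have hstA : stepA seq (n1, n2, pvS seq 2 n - pvS seq 2 i, i - 1, pvC seq n (i - 1), false) i
          = (n1, n2, pvS seq 2 n - pvS seq 2 i, i - 1, pvC seq n (i - 1), true) := by
        simp only [stepA]
        rw [if_neg (by simp), if_neg hcond]
      have hstB : stepB seq (pvS seq 2 n) (i - 1, pvS seq 2 i, false) i
          = (i - 1, pvS seq 2 i, true) := by
        simp only [stepB]
        rw [if_neg (by simp), if_pos (by omega)]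
      rw [hstA, hstB, stepA_frozen, stepB_frozen]
      exact ⟨rfl, rfl⟩

-- ===== VERDICT (by name: the statement is the Claim_ definition above) =====
theorem elevatorSchedule_spec : Claim_equal_elevatorSchedule := by
  intro seq _
  unfold Spec_elevatorSchedule elevatorSchedule elevatorSchedule_alt
  simp only []
  by_cases hn : 2 ≤ (seq.length : Int)
  · -- the loops run; relate them by loop_rel starting at i = 2
    rw [foldl_pair_add (fun i => PySem.List.pyGetD seq i 0)
        (fun i => PySem.List.pyGetD seq i 0 * (i - 1)), slice_sum]
    have hm := loop_rel seq (seq.length : Int) (((seq.length : Int) - 2).toNat) 2 le_rfl hn rfl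
      0 0 (by rw [pvS_refl]; norm_num)
    rw [pvS_refl] at hm
    simp only [sub_zero] at hm
    have h21 : (2 : Int) - 1 = 1 := by norm_num
    rw [h21] at hm
    have hA0 : (0 : Int) + ((PySem.List.pyRange 2 (seq.length : Int) 1).map
        (fun i => PySem.List.pyGetD seq i 0)).sum = pvS seq 2 (seq.length : Int) := by
      rw [zero_add]; rfl
    have hB0 : (0 : Int) + ((PySem.List.pyRange 2 (seq.length : Int) 1).map
        (fun i => PySem.List.pyGetD seq i 0 * (i - 1))).sum = pvC seq (seq.length : Int) 1 := by
      rw [zero_add, pvC_one]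
    rw [hA0, hB0]
    rw [foldl_add_map (fun i => PySem.List.pyGetD seq i 0 *
      |i - ((PySem.List.pyRange 2 (seq.length : Int) 1).foldl
        (stepB seq (pvS seq 2 (seq.length : Int))) (1, 0, false)).1|), zero_add]
    exact Prod.ext hm.1 (by rw [hm.2]; rfl)
  · -- len(seq) < 2: the ranges are empty, both return (1, 0)
    rw [PySem.List.pyRange_one_eq_nil (by omega)]
    simp
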